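-- pv_equiv track=rewrite | github.com/niko-icarus/ai-mystery-theater | production-planner/shots.py | prompt_for_narrate
-- ===== SOURCE A (Python) =====
-- SCENE_MJ_SUFFIX = "--ar 16:9 --v 6.1 --quality 2 --style raw"
--
-- def prompt_for_narrate(narration_chunk: str, context: dict) -> str:
--     """Generate a visual prompt for a narration shot.
--
--     Narration shots show the setting, evidence, atmosphere —
--     whatever the narrator is describing.
--     """
--     setting = context.get("setting_full", "")
--     period = context.get("period", "")
--
--     # Extract key visual nouns from the narration
--     chunk_lower = narration_chunk.lower()
--
--     # Detect what the narration is describing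
--     if any(w in chunk_lower for w in ["exterior", "outside", "storm", "mountain", "train"]):
--         scene_type = "wide establishing shot, exterior"
--     elif any(w in chunk_lower for w in ["dining", "champagne", "dinner", "celebration"]):
--         scene_type = "interior dining scene, warm candlelight"
--     elif any(w in chunk_lower for w in ["body", "dead", "stabbed", "murder", "crime", "blood"]):
--         scene_type = "dark crime scene, forensic detail, dramatic shadows"
--     elif any(w in chunk_lower for w in ["evidence", "clue", "found", "discovered", "note", "paper"]):
--         scene_type = "evidence close-up, spotlight on dark surface"
--     elif any(w in chunk_lower for w in ["corridor", "hallway", "figure", "shadow", "movement"]):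
--         scene_type = "dark corridor, shadowy figure, atmospheric"
--     elif any(w in chunk_lower for w in ["cabin", "room", "compartment", "berth"]):
--         scene_type = "interior cabin, intimate space, low lighting"
--     elif any(w in chunk_lower for w in ["lounge", "bar", "brandy", "observation"]):
--         scene_type = "luxurious lounge interior, ambient lighting"
--     elif any(w in chunk_lower for w in ["accus", "guilty", "killer", "truth", "reveal"]):
--         scene_type = "dramatic reveal moment, spotlight, theatrical"
--     elif any(w in chunk_lower for w in ["score", "points", "standing", "champion"]):
--         return ""  # Scoring is a title card, not a video prompt
--     else:
--         scene_type = "atmospheric establishing shot"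
--
--     # Truncate narration to key visual description
--     visual_hint = narration_chunk[:80].replace('"', '').replace("'", "")
--
--     return (
--         f"{scene_type}, {visual_hint}, {setting}, {period}, "
--         f"cinematic, dark moody atmosphere {SCENE_MJ_SUFFIX}"
--     )
-- ===== SOURCE B (Python) =====
-- SCENE_MJ_SUFFIX = "--ar 16:9 --v 6.1 --quality 2 --style raw"
--
-- # B strategy: instead of an ordered first-match chain, score every keyword independently
-- # against the chunk and keep the MINIMUM matched priority (argmin), then map the winning
-- # priority through a scene table (None = scoring title card, no video prompt).
-- _RULE_KEYWORDS = [
--     ["exterior", "outside", "storm", "mountain", "train"],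
--     ["dining", "champagne", "dinner", "celebration"],
--     ["body", "dead", "stabbed", "murder", "crime", "blood"],
--     ["evidence", "clue", "found", "discovered", "note", "paper"],
--     ["corridor", "hallway", "figure", "shadow", "movement"],
--     ["cabin", "room", "compartment", "berth"],
--     ["lounge", "bar", "brandy", "observation"],
--     ["accus", "guilty", "killer", "truth", "reveal"],
--     ["score", "points", "standing", "champion"],
-- ]
-- _SCENES = [
--     "wide establishing shot, exterior",
--     "interior dining scene, warm candlelight",
--     "dark crime scene, forensic detail, dramatic shadows",
--     "evidence close-up, spotlight on dark surface",
--     "dark corridor, shadowy figure, atmospheric",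
--     "interior cabin, intimate space, low lighting",
--     "luxurious lounge interior, ambient lighting",
--     "dramatic reveal moment, spotlight, theatrical",
--     None,
-- ]
-- _KEYWORD_PRIORITY = {kw: i for i, kws in enumerate(_RULE_KEYWORDS) for kw in kws}
--
-- def prompt_for_narrate(narration_chunk: str, context: dict) -> str:
--     chunk_lower = narration_chunk.lower()
--     best = None
--     for kw, pri in _KEYWORD_PRIORITY.items():
--         if kw in chunk_lower and (best is None or pri < best):
--             best = pri
--     if best is None:
--         scene_type = "atmospheric establishing shot"
--     else:
--         scene_type = _SCENES[best]
--         if scene_type is None: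
--             return ""
--     visual_hint = narration_chunk[:80].replace('"', '').replace("'", "")
--     return (
--         f"{scene_type}, {visual_hint}, {context.get('setting_full', '')}, "
--         f"{context.get('period', '')}, cinematic, dark moody atmosphere {SCENE_MJ_SUFFIX}"
--     )
-- ===== Notes on version B (the rewrite author's own statement) =====
-- stated objective: alternative
-- what changed: Replaces the eight-branch first-match if/elif chain by independent scoring: a flat keyword->priority map built from the rule lists is scanned once, the minimum matched priority (argmin) is kept, and that priority is mapped through a scene table whose None entry is the scoring title card returning the empty string.
import Mathlib
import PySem

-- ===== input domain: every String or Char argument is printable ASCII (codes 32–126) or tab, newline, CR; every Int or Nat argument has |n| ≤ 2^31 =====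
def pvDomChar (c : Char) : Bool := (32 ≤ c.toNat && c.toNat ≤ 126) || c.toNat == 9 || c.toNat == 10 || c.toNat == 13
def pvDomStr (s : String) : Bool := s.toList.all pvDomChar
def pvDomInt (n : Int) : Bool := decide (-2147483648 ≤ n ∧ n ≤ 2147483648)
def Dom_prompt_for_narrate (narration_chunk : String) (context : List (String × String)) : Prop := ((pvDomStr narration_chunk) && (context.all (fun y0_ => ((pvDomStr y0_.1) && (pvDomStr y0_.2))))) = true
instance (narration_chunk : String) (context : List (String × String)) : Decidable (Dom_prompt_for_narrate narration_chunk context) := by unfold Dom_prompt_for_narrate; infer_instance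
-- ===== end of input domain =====

-- B replaces A's ordered first-match if/elif chain by independent keyword scoring: a flat
-- keyword→priority map is scanned once keeping the minimum matched priority (argmin), which
-- indexes a scene table (none = scoring title card, empty string). Objective: alternative.

def SCENE_MJ_SUFFIX : String := "--ar 16:9 --v 6.1 --quality 2 --style raw"

-- ===== PORT A =====
def prompt_for_narrate (narration_chunk : String) (context : List (String × String)) : String :=
  let setting := PySem.Dict.getD (PySem.Dict.mk context) "setting_full" ""
  let period := PySem.Dict.getD (PySem.Dict.mk context) "period" ""
  let chunk_lower := PySem.Str.lower narration_chunk
  let finish : String → String := fun scene_type =>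
    let visual_hint :=
      PySem.Str.replace (PySem.Str.replace (PySem.Str.slice narration_chunk none (some 80)) "\"" "") "'" ""
    scene_type ++ ", " ++ visual_hint ++ ", " ++ setting ++ ", " ++ period ++ ", " ++
      "cinematic, dark moody atmosphere " ++ SCENE_MJ_SUFFIX
  if (["exterior", "outside", "storm", "mountain", "train"].any fun w => PySem.Str.isIn w chunk_lower) then
    finish "wide establishing shot, exterior"
  else if (["dining", "champagne", "dinner", "celebration"].any fun w => PySem.Str.isIn w chunk_lower) then
    finish "interior dining scene, warm candlelight"
  else if (["body", "dead", "stabbed", "murder", "crime", "blood"].any fun w => PySem.Str.isIn w chunk_lower) then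
    finish "dark crime scene, forensic detail, dramatic shadows"
  else if (["evidence", "clue", "found", "discovered", "note", "paper"].any fun w => PySem.Str.isIn w chunk_lower) then
    finish "evidence close-up, spotlight on dark surface"
  else if (["corridor", "hallway", "figure", "shadow", "movement"].any fun w => PySem.Str.isIn w chunk_lower) then
    finish "dark corridor, shadowy figure, atmospheric"
  else if (["cabin", "room", "compartment", "berth"].any fun w => PySem.Str.isIn w chunk_lower) then
    finish "interior cabin, intimate space, low lighting"
  else if (["lounge", "bar", "brandy", "observation"].any fun w => PySem.Str.isIn w chunk_lower) then
    finish "luxurious lounge interior, ambient lighting"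
  else if (["accus", "guilty", "killer", "truth", "reveal"].any fun w => PySem.Str.isIn w chunk_lower) then
    finish "dramatic reveal moment, spotlight, theatrical"
  else if (["score", "points", "standing", "champion"].any fun w => PySem.Str.isIn w chunk_lower) then
    ""
  else
    finish "atmospheric establishing shot"

-- ===== PORT B =====
def RULE_KEYWORDS : List (List String) :=
  [ ["exterior", "outside", "storm", "mountain", "train"],
    ["dining", "champagne", "dinner", "celebration"],
    ["body", "dead", "stabbed", "murder", "crime", "blood"],
    ["evidence", "clue", "found", "discovered", "note", "paper"],
    ["corridor", "hallway", "figure", "shadow", "movement"],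
    ["cabin", "room", "compartment", "berth"],
    ["lounge", "bar", "brandy", "observation"],
    ["accus", "guilty", "killer", "truth", "reveal"],
    ["score", "points", "standing", "champion"] ]

def SCENES : List (Option String) :=
  [ some "wide establishing shot, exterior",
    some "interior dining scene, warm candlelight",
    some "dark crime scene, forensic detail, dramatic shadows",
    some "evidence close-up, spotlight on dark surface",
    some "dark corridor, shadowy figure, atmospheric",
    some "interior cabin, intimate space, low lighting",
    some "luxurious lounge interior, ambient lighting",
    some "dramatic reveal moment, spotlight, theatrical",
    none ]

-- flat keyword→priority association list ({kw: i for i, kws in enumerate(...) for kw in kws};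
-- keys are unique, so the dict's items are exactly this list in this order)
def flatWith : Nat → List (List String) → List (String × Nat)
  | _, [] => []
  | k, ws :: gs => (ws.map fun w => (w, k)) ++ flatWith (k + 1) gs

def KEYWORD_PRIORITY : List (String × Nat) := flatWith 0 RULE_KEYWORDS

-- one loop step: keep the smallest matched priority
def pvStep (cl : String) (best : Option Nat) (kp : String × Nat) : Option Nat :=
  if PySem.Str.isIn kp.1 cl && (match best with | none => true | some m => decide (kp.2 < m)) then
    some kp.2
  else best

def prompt_for_narrate_alt (narration_chunk : String) (context : List (String × String)) : String :=
  let chunk_lower := PySem.Str.lower narration_chunk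
  let best := KEYWORD_PRIORITY.foldl (pvStep chunk_lower) none
  let build : String → String := fun scene_type =>
    let visual_hint :=
      PySem.Str.replace (PySem.Str.replace (PySem.Str.slice narration_chunk none (some 80)) "\"" "") "'" ""
    scene_type ++ ", " ++ visual_hint ++ ", " ++
      PySem.Dict.getD (PySem.Dict.mk context) "setting_full" "" ++ ", " ++
      PySem.Dict.getD (PySem.Dict.mk context) "period" "" ++ ", " ++
      "cinematic, dark moody atmosphere " ++ SCENE_MJ_SUFFIX
  match best with
  | none => build "atmospheric establishing shot"
  | some b =>
    -- _SCENES[best]: best < 9 always holds, the index is in range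
    match SCENES.getD b none with
    | none => ""
    | some scene => build scene

-- ===== PRECONDITION & SPEC =====
def Spec_prompt_for_narrate (narration_chunk : String) (context : List (String × String)) (out : String) : Prop := out = prompt_for_narrate_alt narration_chunk context
instance (narration_chunk : String) (context : List (String × String)) (out : String) : Decidable (Spec_prompt_for_narrate narration_chunk context out) := by unfold Spec_prompt_for_narrate; infer_instance

-- ===== CLAIM (what is proved, stated in full; the proofs are below) =====
def Claim_equal_prompt_for_narrate : Prop := ∀ (narration_chunk : String) (context : List (String × String)), Dom_prompt_for_narrate narration_chunk context → Spec_prompt_for_narrate narration_chunk context (prompt_for_narrate narration_chunk context)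

-- ===== LEMMAS AND PROOFS =====

theorem mem_flatWith {x : String × Nat} : ∀ (k : Nat) (gs : List (List String)),
    x ∈ flatWith k gs → k ≤ x.2 := by
  intro k gs
  induction gs generalizing k with
  | nil => intro h; cases h
  | cons ws gs ih =>
    intro h
    rcases List.mem_append.1 h with h | h
    · obtain ⟨w, -, rfl⟩ := List.mem_map.1 h; exact le_refl k
    · exact Nat.le_of_succ_le (ih (k + 1) h)

theorem pvStep_skip (cl : String) (m : Nat) : ∀ (l : List (String × Nat)),
    (∀ x ∈ l, m ≤ x.2) → l.foldl (pvStep cl) (some m) = some m := by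
  intro l
  induction l with
  | nil => intro _; rfl
  | cons x xs ih =>
    intro h
    have hm : ¬ (x.2 < m) := Nat.not_lt.mpr (h x (List.mem_cons_self ..))
    have hstep : pvStep cl (some m) x = some m := by
      simp [pvStep, hm]
    rw [List.foldl_cons, hstep]
    exact ih fun y hy => h y (List.mem_cons_of_mem _ hy)

theorem pvStep_group (cl : String) (k : Nat) : ∀ (ws : List String),
    (ws.map fun w => (w, k)).foldl (pvStep cl) none =
      if ws.any (fun w => PySem.Str.isIn w cl) then some k else none := by
  intro ws
  induction ws with
  | nil => rfl
  | cons w ws ih =>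
    by_cases h : PySem.Str.isIn w cl = true
    · have hc : PySem.Chars.isIn w.toList cl.toList = true := by simpa using h
      have hstep : pvStep cl none (w, k) = some k := by simp [pvStep, hc]
      rw [List.map_cons, List.foldl_cons, hstep,
        pvStep_skip cl k _ (fun x hx => by obtain ⟨w', -, rfl⟩ := List.mem_map.1 hx; exact le_refl k)]
      simp [hc]
    · have hc : PySem.Chars.isIn w.toList cl.toList = false := by simpa using h
      have hstep : pvStep cl none (w, k) = none := by simp [pvStep, hc]
      rw [List.map_cons, List.foldl_cons, hstep, ih]
      simp [hc]

theorem chain_step (cl : String) (ws : List String) (gs : List (List String)) (k : Nat) :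
    (flatWith k (ws :: gs)).foldl (pvStep cl) none =
      if ws.any (fun w => PySem.Str.isIn w cl) then some k
      else (flatWith (k + 1) gs).foldl (pvStep cl) none := by
  rw [show flatWith k (ws :: gs) = (ws.map fun w => (w, k)) ++ flatWith (k + 1) gs from rfl,
    List.foldl_append, pvStep_group]
  by_cases h : ws.any (fun w => PySem.Str.isIn w cl) = true
  · rw [if_pos h, if_pos h]
    exact pvStep_skip cl k _ (fun x hx => Nat.le_of_succ_le (mem_flatWith (k + 1) gs hx))
  · rw [if_neg h, if_neg h]

-- ===== VERDICT (by name: the statement is the Claim_ definition above) =====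
set_option maxHeartbeats 4000000 in
theorem prompt_for_narrate_spec : Claim_equal_prompt_for_narrate := by
  intro nc ctx _
  show prompt_for_narrate nc ctx = prompt_for_narrate_alt nc ctx
  simp only [prompt_for_narrate, prompt_for_narrate_alt, KEYWORD_PRIORITY, RULE_KEYWORDS]
  rw [chain_step, chain_step, chain_step, chain_step, chain_step, chain_step, chain_step,
    chain_step, chain_step]
  by_cases h1 : (["exterior", "outside", "storm", "mountain", "train"].any fun w => PySem.Str.isIn w (PySem.Str.lower nc)) = true
  · simp only [h1]; rfl
  simp only [h1]
  by_cases h2 : (["dining", "champagne", "dinner", "celebration"].any fun w => PySem.Str.isIn w (PySem.Str.lower nc)) = true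
  · simp only [h2]; rfl
  simp only [h2]
  by_cases h3 : (["body", "dead", "stabbed", "murder", "crime", "blood"].any fun w => PySem.Str.isIn w (PySem.Str.lower nc)) = true
  · simp only [h3]; rfl
  simp only [h3]
  by_cases h4 : (["evidence", "clue", "found", "discovered", "note", "paper"].any fun w => PySem.Str.isIn w (PySem.Str.lower nc)) = true
  · simp only [h4]; rfl
  simp only [h4]
  by_cases h5 : (["corridor", "hallway", "figure", "shadow", "movement"].any fun w => PySem.Str.isIn w (PySem.Str.lower nc)) = true
  · simp only [h5]; rfl
  simp only [h5]
  by_cases h6 : (["cabin", "room", "compartment", "berth"].any fun w => PySem.Str.isIn w (PySem.Str.lower nc)) = true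
  · simp only [h6]; rfl
  simp only [h6]
  by_cases h7 : (["lounge", "bar", "brandy", "observation"].any fun w => PySem.Str.isIn w (PySem.Str.lower nc)) = true
  · simp only [h7]; rfl
  simp only [h7]
  by_cases h8 : (["accus", "guilty", "killer", "truth", "reveal"].any fun w => PySem.Str.isIn w (PySem.Str.lower nc)) = true
  · simp only [h8]; rfl
  simp only [h8]
  by_cases h9 : (["score", "points", "standing", "champion"].any fun w => PySem.Str.isIn w (PySem.Str.lower nc)) = true
  · simp only [h9]; rfl
  simp only [h9]
  rfl
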